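-- pv_equiv track=rewrite | github.com/asreview/asreview | asreview/simulation/readers.py | reorder_results
-- ===== SOURCE A (Python) =====
-- def reorder_results(old_results):
--     """
--     From a dictionary of results, create a better ordered result.
--     The hierarchy of the new dictionary is:
--     logname -> query_id -> filename -> data.
--
--     Arguments
--     ---------
--     old_results: dict
--         Results to reorder.
--
--     Returns
--     dict:
--         Reordered results.
--     """
--     results = {}
--
--     for fp in old_results:
--         for query_i, query in enumerate(old_results[fp]["results"]):
--             for logname in query:
--                 if logname not in results:
--                     results[logname] = []
--                 while len(results[logname]) <= query_i:
--                     results[logname].append([])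
--
--                 results[logname][query_i].append(query[logname])
--     return results
-- ===== SOURCE B (Python) =====
-- def reorder_results(old_results):
--     # Transposed assembly: flatten to an ordered list of (query_i, query) pairs, then
--     # for each logname build its whole row at once by scanning that flat list per index.
--     queries = [(qi, q) for fp in old_results
--                for qi, q in enumerate(old_results[fp]["results"])]
--     lognames = dict.fromkeys(ln for _, q in queries for ln in q)
--     return {ln: [[q[ln] for qi, q in queries if qi == i and ln in q]
--                  for i in range(1 + max(qi for qi, q in queries if ln in q))]
--             for ln in lognames}
-- ===== Notes on version B (the rewrite author's own statement) =====
-- stated objective: alternative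
-- what changed: B replaces A's single mutating pass with while-loop gap padding by a transposed, purely declarative build: flatten to an ordered list of (query_i, query) pairs once, then for each logname compute its whole row as [[q[ln] for qi,q in queries if qi==i and ln in q] for i in range(1+max(...))] - per-logname rescans instead of incremental dict mutation; Pre_ excludes inputs where some value dict lacks the 'results' key, on which both A and B raise KeyError.
import Mathlib
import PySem

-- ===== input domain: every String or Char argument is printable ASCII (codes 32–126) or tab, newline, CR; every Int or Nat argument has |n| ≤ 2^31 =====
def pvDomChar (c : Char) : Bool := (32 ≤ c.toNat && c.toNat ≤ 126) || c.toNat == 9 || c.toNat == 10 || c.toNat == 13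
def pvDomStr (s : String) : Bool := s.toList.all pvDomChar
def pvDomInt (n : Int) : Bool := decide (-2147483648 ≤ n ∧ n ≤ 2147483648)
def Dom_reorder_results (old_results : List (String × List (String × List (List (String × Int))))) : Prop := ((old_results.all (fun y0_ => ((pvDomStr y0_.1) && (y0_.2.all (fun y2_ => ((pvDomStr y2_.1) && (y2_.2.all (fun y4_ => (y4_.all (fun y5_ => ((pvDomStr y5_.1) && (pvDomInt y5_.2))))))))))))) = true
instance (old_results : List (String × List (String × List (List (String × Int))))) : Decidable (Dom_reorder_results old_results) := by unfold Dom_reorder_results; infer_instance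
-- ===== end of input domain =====

-- B replaces A's single mutating pass (dict of growing lists with while-loop gap padding)
-- by a transposed declarative build: flatten once to an ordered list of (query_i, query)
-- pairs, then compute each logname's whole row by per-index scans of that flat list;
-- objective: alternative (not claimed faster).

-- Shared input decoding: the Python argument is a dict of dicts of lists of dicts.
abbrev pvRA := PySem.Dict String (List (List Int))

def pvToDicts (old_results : List (String × List (String × List (List (String × Int))))) :
    PySem.Dict String (PySem.Dict String (List (PySem.Dict String Int))) :=
  PySem.Dict.ofList (old_results.map (fun p =>
    (p.1, PySem.Dict.ofList (p.2.map (fun q => (q.1, q.2.map PySem.Dict.ofList))))))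

-- ===== PORT A =====
-- the 'while len(results[logname]) <= query_i: results[logname].append([])' padding loop
def pvPad (l : List (List Int)) (qi : Int) : List (List Int) :=
  if (l.length : Int) ≤ qi then pvPad (l ++ [[]]) qi else l
termination_by (qi + 1 - l.length).toNat
decreasing_by simp only [List.length_append, List.length_cons, List.length_nil]; omega

-- Notes: under Pre_ the key "results" is present, so the getD default [] is never used;
-- qq.1 is an enumerate index, hence ≥ 0, so .toNat is exact.
def reorder_results (old_results : List (String × List (String × List (List (String × Int))))) : List (String × List (List Int)) :=
  let d := pvToDicts old_results
  (d.keys.foldl (fun results fp =>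
      (PySem.List.enumerate ((d.getD fp PySem.Dict.empty).getD "results" [])).foldl
        (fun results qq =>
          qq.2.keys.foldl (fun results logname =>
            let results1 := if results.contains logname then results else results.insert logname []
            let cur := pvPad (results1.getD logname []) qq.1
            results1.insert logname (cur.set qq.1.toNat (cur.getD qq.1.toNat [] ++ [qq.2.getD logname 0])))
          results)
        results)
    (PySem.Dict.empty : pvRA)).items

-- ===== PORT B =====
-- 'queries = [(qi, q) for fp in old_results for qi, q in enumerate(old_results[fp]["results"])]'
-- 'lognames = dict.fromkeys(ln for _, q in queries for ln in q)'  (PySem.List.dedup)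
-- then one row per logname:  [[q[ln] for qi, q in queries if qi == i and ln in q]
--                             for i in range(1 + max(qi for qi, q in queries if ln in q))].
-- Python's max is applied to a nonempty generator (ln comes from queries); the '.getD (-1)'
-- is only a totality guard for the empty case that never occurs.
def reorder_results_alt (old_results : List (String × List (String × List (List (String × Int))))) : List (String × List (List Int)) :=
  let d := pvToDicts old_results
  let queries := d.keys.flatMap (fun fp =>
    PySem.List.enumerate ((d.getD fp PySem.Dict.empty).getD "results" []))
  let lognames := PySem.List.dedup (queries.flatMap (fun qq => qq.2.keys))
  lognames.map (fun ln =>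
    (ln,
     (PySem.List.pyRange 0
        (1 + ((PySem.List.max? ((queries.filter (fun qq => qq.2.contains ln)).map (·.1)) id).getD (-1))) 1).map
       (fun i =>
         (queries.filter (fun qq => qq.1 == i && qq.2.contains ln)).map (fun qq => qq.2.getD ln 0))))

-- ===== PRECONDITION & SPEC =====
-- Pre_ excludes exactly the inputs on which the Python raises KeyError: some value dict
-- of old_results (after Python's dict collapse of duplicate keys) lacks the key "results".
def Pre_reorder_results (old_results : List (String × List (String × List (List (String × Int))))) : Prop :=
  ∀ v ∈ (PySem.Dict.ofList old_results).values, (PySem.Dict.ofList v).contains "results" = true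
instance (old_results : List (String × List (String × List (List (String × Int))))) : Decidable (Pre_reorder_results old_results) := by unfold Pre_reorder_results; infer_instance

def pvWitness_reorder_results : (List (String × List (String × List (List (String × Int))))) :=
  [("f", [("results", [[("a", 1)]])])]

def Spec_reorder_results (old_results : List (String × List (String × List (List (String × Int))))) (out : List (String × List (List Int))) : Prop := out = reorder_results_alt old_results
instance (old_results : List (String × List (String × List (List (String × Int))))) (out : List (String × List (List Int))) : Decidable (Spec_reorder_results old_results out) := by unfold Spec_reorder_results; infer_instance

-- ===== CLAIM (what is proved, stated in full; the proofs are below) =====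
def Claim_equal_reorder_results : Prop := ∀ (old_results : List (String × List (String × List (List (String × Int))))), Dom_reorder_results old_results → Pre_reorder_results old_results → Spec_reorder_results old_results (reorder_results old_results)

-- ===== LEMMAS AND PROOFS =====

-- the flat list of (query_i, query) pairs both programs traverse, and its triple stream
def pvQueries (d : PySem.Dict String (PySem.Dict String (List (PySem.Dict String Int)))) :
    List (Int × PySem.Dict String Int) :=
  d.keys.flatMap (fun fp =>
    PySem.List.enumerate ((d.getD fp PySem.Dict.empty).getD "results" []))

def pvTs (queries : List (Int × PySem.Dict String Int)) : List (Int × String × Int) :=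
  queries.flatMap (fun qq => qq.2.items.map (fun kv => (qq.1, kv.1, kv.2)))

-- A's per-triple step
def pvStepA (r : pvRA) (t : Int × String × Int) : pvRA :=
  let results1 := if r.contains t.2.1 then r else r.insert t.2.1 []
  let cur := pvPad (results1.getD t.2.1 []) t.1
  results1.insert t.2.1 (cur.set t.1.toNat (cur.getD t.1.toNat [] ++ [t.2.2]))

-- the triple-stream reading of B's comprehensions
def pvLns (ts : List (Int × String × Int)) : List String := PySem.List.dedup (ts.map (·.2.1))
def pvQis (ts : List (Int × String × Int)) (ln : String) : List Int :=
  (ts.filter (fun t => t.2.1 == ln)).map (·.1)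
def pvBkt (ts : List (Int × String × Int)) (ln : String) (i : Int) : List Int :=
  (ts.filter (fun t => t.1 == i && t.2.1 == ln)).map (·.2.2)
def pvVal (ts : List (Int × String × Int)) (ln : String) : List (List Int) :=
  (PySem.List.pyRange 0 (1 + (PySem.List.max? (pvQis ts ln) id).getD (-1)) 1).map (pvBkt ts ln)

theorem pvFilterNodup (l : List (String × Int)) (ln : String) (v : Int)
    (h : (l.map (·.1)).Nodup) (hv : (ln, v) ∈ l) :
    l.filter (fun kv => kv.1 == ln) = [(ln, v)] := by
  induction l with
  | nil => simp at hv
  | cons p t ih =>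
      simp only [List.map_cons, List.nodup_cons] at h
      rcases List.mem_cons.1 hv with h1 | h1
      · subst h1
        rw [List.filter_cons_of_pos (by simp)]
        have ht : t.filter (fun kv => kv.1 == ln) = [] := by
          rw [List.filter_eq_nil_iff]
          intro kv hkv
          simp only [beq_iff_eq]
          intro he
          exact h.1 (he ▸ List.mem_map_of_mem (f := (·.1)) hkv)
        simp [ht]
      · have hne : (p.1 == ln) = false := by
          simp only [beq_eq_false_iff_ne]
          intro he
          exact h.1 (he ▸ List.mem_map_of_mem (f := (·.1)) h1)
        rw [List.filter_cons_of_neg (by simp [hne])]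
        exact ih h.2 h1

-- one query dict contributes its (ln, value) entry at most once
theorem pvItemsFilter (q : PySem.Dict String Int) (ln : String) (h : q.keys.Nodup) :
    q.items.filter (fun kv => kv.1 == ln)
      = if q.contains ln then [(ln, q.getD ln 0)] else [] := by
  cases hc : q.contains ln
  · simp only [Bool.false_eq_true, if_false]
    rw [List.filter_eq_nil_iff]
    intro kv hkv
    simp only [beq_iff_eq]
    intro he
    have hmemk : ln ∈ q.keys := by
      have := List.mem_map_of_mem (f := (·.1)) hkv
      simpa [PySem.Dict.keys, he] using this
    have := (PySem.Dict.contains_iff_mem_keys q ln).2 hmemk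
    rw [hc] at this
    exact absurd this (by simp)
  · simp only [if_true]
    have hsome : ∃ v, q.get? ln = some v := by
      rcases hv : q.get? ln with _ | v
      · rw [PySem.Dict.contains_eq_isSome_get?, hv] at hc; simp at hc
      · exact ⟨v, rfl⟩
    obtain ⟨v, hv⟩ := hsome
    have hmem := PySem.Dict.mem_items_of_get?_eq_some q hv
    have hgd : q.getD ln 0 = v := by rw [PySem.Dict.getD_eq_get?_getD, hv]; rfl
    rw [hgd]
    exact pvFilterNodup q.items ln v (by simpa [PySem.Dict.keys] using h) hmem

theorem pvMapFst (queries : List (Int × PySem.Dict String Int)) :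
    (pvTs queries).map (·.2.1) = queries.flatMap (fun qq => qq.2.keys) := by
  unfold pvTs
  rw [List.map_flatMap]
  congr 1
  funext qq
  rw [List.map_map]
  rfl

theorem pvFilterLn (queries : List (Int × PySem.Dict String Int)) (ln : String)
    (h : ∀ qq ∈ queries, (qq.2 : PySem.Dict String Int).keys.Nodup) :
    (pvTs queries).filter (fun t => t.2.1 == ln)
      = (queries.filter (fun qq => qq.2.contains ln)).map (fun qq => (qq.1, ln, qq.2.getD ln 0)) := by
  induction queries with
  | nil => rfl
  | cons qq rest ih =>
      have hnd := h qq List.mem_cons_self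
      have ihr := ih (fun q hq => h q (List.mem_cons_of_mem _ hq))
      unfold pvTs at ihr ⊢
      simp only [List.flatMap_cons, List.filter_append, List.filter_cons]
      rw [List.filter_map,
        show ((fun t : Int × String × Int => t.2.1 == ln) ∘ (fun kv : String × Int => (qq.1, kv.1, kv.2)))
            = (fun kv : String × Int => kv.1 == ln) from rfl,
        pvItemsFilter qq.2 ln hnd, ihr]
      cases hc : qq.2.contains ln
      · simp
      · simp

theorem pvFilterQi (queries : List (Int × PySem.Dict String Int)) (ln : String) (i : Int)
    (h : ∀ qq ∈ queries, (qq.2 : PySem.Dict String Int).keys.Nodup) :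
    (pvTs queries).filter (fun t => t.1 == i && t.2.1 == ln)
      = (queries.filter (fun qq => qq.1 == i && qq.2.contains ln)).map (fun qq => (qq.1, ln, qq.2.getD ln 0)) := by
  induction queries with
  | nil => rfl
  | cons qq rest ih =>
      have hnd := h qq List.mem_cons_self
      have ihr := ih (fun q hq => h q (List.mem_cons_of_mem _ hq))
      unfold pvTs at ihr ⊢
      simp only [List.flatMap_cons, List.filter_append, List.filter_cons]
      rw [List.filter_map,
        show ((fun t : Int × String × Int => t.1 == i && t.2.1 == ln) ∘ (fun kv : String × Int => (qq.1, kv.1, kv.2)))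
            = (fun kv : String × Int => qq.1 == i && kv.1 == ln) from rfl, ihr]
      cases hqi : (qq.1 == i)
      · simp
      · simp only [Bool.true_and]
        rw [pvItemsFilter qq.2 ln hnd]
        cases hc : qq.2.contains ln
        · simp
        · simp

theorem pvValues_update {κ ν : Type} [BEq κ] [LawfulBEq κ] (l : List (κ × ν)) (d : PySem.Dict κ ν)
    (v : ν) (h : v ∈ (d.update l).values) : v ∈ d.values ∨ ∃ p ∈ l, v = p.2 := by
  induction l generalizing d with
  | nil => exact Or.inl h
  | cons p t ih =>
      have h' : v ∈ ((d.insert p.1 p.2).update t).values := by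
        simpa [PySem.Dict.update, List.foldl_cons] using h
      rcases ih _ h' with h'' | ⟨q, hq, hv⟩
      · rcases PySem.Dict.mem_values_insert _ _ _ _ h'' with rfl | h3
        · exact Or.inr ⟨p, List.mem_cons_self, rfl⟩
        · exact Or.inl h3
      · exact Or.inr ⟨q, List.mem_cons_of_mem _ hq, hv⟩

theorem pvQNodup (old_results : List (String × List (String × List (List (String × Int)))))
    (fp : String) (q : PySem.Dict String Int)
    (hq : q ∈ ((pvToDicts old_results).getD fp PySem.Dict.empty).getD "results" []) :
    q.keys.Nodup := by
  rw [PySem.Dict.getD_eq_get?_getD (pvToDicts old_results) fp PySem.Dict.empty] at hq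
  rcases hD : (pvToDicts old_results).get? fp with _ | v
  · rw [hD] at hq
    simp [PySem.Dict.getD_empty] at hq
  · rw [hD] at hq
    simp only [Option.getD_some] at hq
    have hv : v ∈ (pvToDicts old_results).values := by
      simp only [PySem.Dict.values, List.mem_map]
      exact ⟨(fp, v), PySem.Dict.mem_items_of_get?_eq_some _ hD, rfl⟩
    rcases pvValues_update _ PySem.Dict.empty v hv with h0 | ⟨p, hp, rfl⟩
    · simp [PySem.Dict.values, PySem.Dict.empty] at h0
    · obtain ⟨a, _, rfl⟩ := List.mem_map.1 hp
      rw [PySem.Dict.getD_eq_get?_getD _ "results" []] at hq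
      rcases hw : (PySem.Dict.ofList (a.2.map (fun q => (q.1, q.2.map PySem.Dict.ofList)))).get? "results" with _ | w
      · rw [hw] at hq; simp at hq
      · rw [hw] at hq
        simp only [Option.getD_some] at hq
        have hwv : w ∈ (PySem.Dict.ofList (a.2.map (fun q => (q.1, q.2.map PySem.Dict.ofList)))).values := by
          simp only [PySem.Dict.values, List.mem_map]
          exact ⟨("results", w), PySem.Dict.mem_items_of_get?_eq_some _ hw, rfl⟩
        rcases pvValues_update _ PySem.Dict.empty w hwv with h0 | ⟨r, hr, rfl⟩
        · simp [PySem.Dict.values, PySem.Dict.empty] at h0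
        · obtain ⟨b, _, rfl⟩ := List.mem_map.1 hr
          obtain ⟨c, _, rfl⟩ := List.mem_map.1 hq
          exact PySem.Dict.nodup_keys_ofList c

theorem pvQueriesNodup (old_results : List (String × List (String × List (List (String × Int)))))
    (qq : Int × PySem.Dict String Int) (hqq : qq ∈ pvQueries (pvToDicts old_results)) :
    qq.2.keys.Nodup := by
  unfold pvQueries at hqq
  obtain ⟨fp, hfp, hmem⟩ := List.mem_flatMap.1 hqq
  obtain ⟨k, hk, rfl⟩ := (PySem.List.mem_enumerate_iff _ _ _).1 hmem
  exact pvQNodup old_results fp _ (List.getElem_mem _)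

theorem pvTsNonneg (queries : List (Int × PySem.Dict String Int))
    (hq : ∀ qq ∈ queries, 0 ≤ qq.1) (t : Int × String × Int) (ht : t ∈ pvTs queries) : 0 ≤ t.1 := by
  unfold pvTs at ht
  obtain ⟨qq, hqq, hmem⟩ := List.mem_flatMap.1 ht
  obtain ⟨kv, _, rfl⟩ := List.mem_map.1 hmem
  exact hq qq hqq

theorem pvQueriesNonneg (d : PySem.Dict String (PySem.Dict String (List (PySem.Dict String Int))))
    (qq : Int × PySem.Dict String Int) (hqq : qq ∈ pvQueries d) : 0 ≤ qq.1 := by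
  unfold pvQueries at hqq
  obtain ⟨fp, hfp, hmem⟩ := List.mem_flatMap.1 hqq
  obtain ⟨k, hk, rfl⟩ := (PySem.List.mem_enumerate_iff _ _ _).1 hmem
  simp

theorem pvPortA_eq (old_results : List (String × List (String × List (List (String × Int))))) :
    reorder_results old_results
      = ((pvTs (pvQueries (pvToDicts old_results))).foldl pvStepA PySem.Dict.empty).items := by
  simp only [reorder_results, pvTs, pvQueries, List.foldl_flatMap, List.foldl_map]
  congr 1
  apply PySem.List.foldl_congr_mem
  intro acc fp _
  apply PySem.List.foldl_congr_mem
  intro acc2 qq hqq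
  have hnd : qq.2.keys.Nodup := pvQNodup old_results fp qq.2 (by
    obtain ⟨k, hk, rfl⟩ := (PySem.List.mem_enumerate_iff _ _ _).1 hqq
    exact List.getElem_mem _)
  rw [PySem.Dict.items_eq_map_keys qq.2 hnd 0, List.foldl_map]
  rfl

theorem pvPortB_eq (old_results : List (String × List (String × List (List (String × Int))))) :
    reorder_results_alt old_results
      = (pvLns (pvTs (pvQueries (pvToDicts old_results)))).map
          (fun ln => (ln, pvVal (pvTs (pvQueries (pvToDicts old_results))) ln)) := by
  have e : reorder_results_alt old_results =
      (PySem.List.dedup ((pvQueries (pvToDicts old_results)).flatMap (fun qq => qq.2.keys))).map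
        (fun ln => (ln,
          (PySem.List.pyRange 0
            (1 + ((PySem.List.max? (((pvQueries (pvToDicts old_results)).filter
                (fun qq => qq.2.contains ln)).map (·.1)) id).getD (-1))) 1).map
            (fun i => (((pvQueries (pvToDicts old_results)).filter
                (fun qq => qq.1 == i && qq.2.contains ln)).map (fun qq => qq.2.getD ln 0))))) := rfl
  rw [e]
  have hnd := pvQueriesNodup old_results
  unfold pvLns pvVal pvQis pvBkt
  rw [pvMapFst]
  apply List.map_congr_left
  intro ln _
  rw [pvFilterLn _ ln hnd, List.map_map]
  congr 1
  apply List.map_congr_left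
  intro i _
  rw [pvFilterQi _ ln i hnd, List.map_map]
  rfl

theorem pvPad_eq (l : List (List Int)) (qi : Int) :
    pvPad l qi = l ++ List.replicate ((qi + 1 - l.length).toNat) [] := by
  fun_induction pvPad l qi with
  | case1 l h ih =>
      rw [ih]
      rw [show ((qi + 1 - l.length : Int)).toNat = ((qi + 1 - (l ++ [[]]).length : Int)).toNat + 1 from by
        simp only [List.length_append, List.length_cons, List.length_nil]; omega]
      simp [List.replicate_succ, List.append_assoc]
  | case2 l h => simp only [show ((qi + 1 - l.length : Int)).toNat = 0 from by omega, List.replicate_zero, List.append_nil]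

theorem pvMaxAux (ks : List Int) (a : Int) :
    ∃ b, PySem.List.max? (a :: ks) id = some b
      ∧ a ≤ b ∧ (b = a ∨ b ∈ ks) ∧ ∀ y ∈ ks, y ≤ b := by
  induction ks generalizing a with
  | nil => exact ⟨a, by simp [PySem.List.max?], le_refl _, Or.inl rfl, by simp⟩
  | cons k t ih =>
      by_cases h : a < k
      · obtain ⟨b, hb, hab, hmem, hub⟩ := ih k
        refine ⟨b, ?_, by omega, Or.inr ?_, ?_⟩
        · rw [show PySem.List.max? (a :: k :: t) id = PySem.List.max? (k :: t) id from by
            simp [PySem.List.max?, List.foldl_cons, h]]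
          exact hb
        · rcases hmem with rfl | h'
          · exact List.mem_cons_self
          · exact List.mem_cons_of_mem _ h'
        · intro y hy; rcases List.mem_cons.1 hy with rfl | hy'
          · omega
          · exact hub y hy'
      · obtain ⟨b, hb, hab, hmem, hub⟩ := ih a
        refine ⟨b, ?_, hab, ?_, ?_⟩
        · rw [show PySem.List.max? (a :: k :: t) id = PySem.List.max? (a :: t) id from by
            simp [PySem.List.max?, List.foldl_cons, h]]
          exact hb
        · rcases hmem with rfl | h'
          · exact Or.inl rfl
          · exact Or.inr (List.mem_cons_of_mem _ h')
        · intro y hy; rcases List.mem_cons.1 hy with rfl | hy'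
          · omega
          · exact hub y hy'

theorem pvMax?_eq (ks : List Int) (m : Int) (hm : m ∈ ks) (hub : ∀ y ∈ ks, y ≤ m) :
    PySem.List.max? ks id = some m := by
  cases ks with
  | nil => simp at hm
  | cons k t =>
      obtain ⟨b, hb, hab, hmem, hubb⟩ := pvMaxAux t k
      have h1 : b ≤ m := by
        rcases hmem with rfl | h'
        · exact hub _ (List.mem_cons_self)
        · exact hub _ (List.mem_cons_of_mem _ h')
      have h2 : m ≤ b := by
        rcases List.mem_cons.1 hm with rfl | h'
        · exact hab
        · exact hubb _ h'
      rw [hb, le_antisymm h1 h2]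

theorem pvSetAdd (s : PySem.Set String) (x : String) :
    PySem.Set.add s x = if x ∈ s then s else s ++ [x] := by
  show (if PySem.Set.contains s x then s else s ++ [x]) = _
  rw [show PySem.Set.contains s x = List.contains s x from rfl]
  by_cases h : x ∈ s
  · rw [if_pos ((List.contains_iff_mem).2 h), if_pos h]
  · rw [if_neg (fun hc => h ((List.contains_iff_mem).1 hc)), if_neg h]

theorem pvLns_snoc (ts : List (Int × String × Int)) (t : Int × String × Int) :
    pvLns (ts ++ [t]) = if t.2.1 ∈ pvLns ts then pvLns ts else pvLns ts ++ [t.2.1] := by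
  unfold pvLns
  rw [List.map_append]
  simp only [PySem.List.dedup_eq_ofList, PySem.Set.ofList_eq_foldl, List.foldl_append,
    List.map_cons, List.map_nil, List.foldl_cons, List.foldl_nil]
  rw [pvSetAdd]

theorem pvMem_lns (ts : List (Int × String × Int)) (ln : String) :
    ln ∈ pvLns ts ↔ ln ∈ ts.map (·.2.1) := by
  unfold pvLns
  rw [PySem.List.dedup_eq_ofList]
  exact PySem.Set.mem_ofList _ _

theorem pvQis_snoc_ne (ts : List (Int × String × Int)) (t : Int × String × Int) (ln : String)
    (h : t.2.1 ≠ ln) : pvQis (ts ++ [t]) ln = pvQis ts ln := by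
  unfold pvQis
  rw [List.filter_append]
  simp [h]

theorem pvQis_snoc_self (ts : List (Int × String × Int)) (qi v : Int) (s : String) :
    pvQis (ts ++ [(qi, s, v)]) s = pvQis ts s ++ [qi] := by
  unfold pvQis
  rw [List.filter_append]
  simp

theorem pvBkt_snoc_ne (ts : List (Int × String × Int)) (t : Int × String × Int) (ln : String)
    (i : Int) (h : t.2.1 ≠ ln) : pvBkt (ts ++ [t]) ln i = pvBkt ts ln i := by
  unfold pvBkt
  rw [List.filter_append]
  simp [h]

theorem pvBkt_snoc_self (ts : List (Int × String × Int)) (qi v : Int) (s : String) (i : Int) :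
    pvBkt (ts ++ [(qi, s, v)]) s i = pvBkt ts s i ++ (if qi = i then [v] else []) := by
  unfold pvBkt
  rw [List.filter_append]
  by_cases h : qi = i <;> simp [h]

theorem pvQis_nonneg (ts : List (Int × String × Int)) (hpos : ∀ t ∈ ts, 0 ≤ t.1) (ln : String) :
    ∀ i ∈ pvQis ts ln, 0 ≤ i := by
  intro i hi
  unfold pvQis at hi
  obtain ⟨t, ht, rfl⟩ := List.mem_map.1 hi
  exact hpos t (List.mem_filter.1 ht).1

theorem pvQis_le_max (ts : List (Int × String × Int)) (ln : String) :
    ∀ i ∈ pvQis ts ln, i ≤ (PySem.List.max? (pvQis ts ln) id).getD (-1) := by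
  intro i hi
  rcases hx : PySem.List.max? (pvQis ts ln) id with _ | m
  · rw [PySem.List.max?_eq_none_iff] at hx
    rw [hx] at hi
    simp at hi
  · exact PySem.List.max?_isMax hx i hi

theorem pvBkt_empty (ts : List (Int × String × Int)) (ln : String) (i : Int)
    (h : i ∉ pvQis ts ln) : pvBkt ts ln i = [] := by
  unfold pvBkt
  rw [List.map_eq_nil_iff, List.filter_eq_nil_iff]
  intro t ht hc
  simp only [Bool.and_eq_true, beq_iff_eq] at hc
  exact h (List.mem_map.2 ⟨t, List.mem_filter.2 ⟨ht, by simp [hc.2]⟩, hc.1⟩)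

theorem pvQis_of_not_mem (ts : List (Int × String × Int)) (ln : String)
    (h : ln ∉ pvLns ts) : pvQis ts ln = [] := by
  rw [pvMem_lns] at h
  unfold pvQis
  rw [List.map_eq_nil_iff, List.filter_eq_nil_iff]
  intro t ht hc
  simp only [beq_iff_eq] at hc
  exact h (List.mem_map.2 ⟨t, ht, hc⟩)

theorem pvVal_eq_range (ts : List (Int × String × Int)) (ln : String) :
    pvVal ts ln = (List.range (1 + (PySem.List.max? (pvQis ts ln) id).getD (-1)).toNat).map
      (fun (k : Nat) => pvBkt ts ln ((k : Nat) : Int)) := by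
  unfold pvVal
  rw [PySem.List.pyRange_one, List.map_map]
  simp only [sub_zero]
  apply List.map_congr_left
  intro k _
  simp

theorem pvVal_of_not_mem (ts : List (Int × String × Int)) (ln : String)
    (h : ln ∉ pvLns ts) : pvVal ts ln = [] := by
  rw [pvVal_eq_range, pvQis_of_not_mem ts ln h]
  simp [PySem.List.max?]

theorem pvVal_snoc_ne (ts : List (Int × String × Int)) (t : Int × String × Int) (ln : String)
    (h : t.2.1 ≠ ln) : pvVal (ts ++ [t]) ln = pvVal ts ln := by
  rw [pvVal_eq_range, pvVal_eq_range, pvQis_snoc_ne ts t ln h]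
  exact List.map_congr_left (fun k _ => pvBkt_snoc_ne ts t ln k h)

theorem pvMax_snoc (qis : List Int) (qi : Int) (hqi : 0 ≤ qi) :
    (PySem.List.max? (qis ++ [qi]) id).getD (-1)
      = max ((PySem.List.max? qis id).getD (-1)) qi := by
  rcases hx : PySem.List.max? qis id with _ | m
  · rw [PySem.List.max?_eq_none_iff] at hx
    subst hx
    rw [List.nil_append, pvMax?_eq [qi] qi (by simp) (by simp)]
    simp only [Option.getD_some, Option.getD_none]
    rw [max_eq_right (by omega : (-1 : Int) ≤ qi)]
  · have hm : m ∈ qis := PySem.List.max?_mem hx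
    have hub : ∀ y ∈ qis, y ≤ m := PySem.List.max?_isMax hx
    rw [pvMax?_eq (qis ++ [qi]) (max m qi) ?_ ?_]
    · simp
    · rcases le_total qi m with h | h
      · rw [max_eq_left h]; exact List.mem_append_left _ hm
      · rw [max_eq_right h]; exact List.mem_append_right _ (by simp)
    · intro y hy
      rcases List.mem_append.1 hy with h | h
      · exact le_trans (hub y h) (le_max_left _ _)
      · simp only [List.mem_singleton] at h
        subst h
        exact le_max_right _ _

theorem pvVal_snoc_self (ts : List (Int × String × Int)) (hpos : ∀ t ∈ ts, 0 ≤ t.1)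
    (qi v : Int) (s : String) (hqi : 0 ≤ qi) :
    pvVal (ts ++ [(qi, s, v)]) s
      = (pvPad (pvVal ts s) qi).set qi.toNat
          ((pvPad (pvVal ts s) qi).getD qi.toNat [] ++ [v]) := by
  set m := (PySem.List.max? (pvQis ts s) id).getD (-1) with hmdef
  have hm0 : -1 ≤ m := by
    rw [hmdef]
    rcases hx : PySem.List.max? (pvQis ts s) id with _ | m0
    · simp
    · have := pvQis_nonneg ts hpos s m0 (PySem.List.max?_mem hx)
      simp only [Option.getD_some]
      omega
  obtain ⟨M, hMeq, hMm, hMqi⟩ : ∃ M : Int, (M = m ∨ M = qi) ∧ m ≤ M ∧ qi ≤ M := by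
    rcases le_total qi m with h | h
    · exact ⟨m, Or.inl rfl, le_refl _, h⟩
    · exact ⟨qi, Or.inr rfl, h, le_refl _⟩
  have hmax' : (PySem.List.max? (pvQis (ts ++ [(qi, s, v)]) s) id).getD (-1) = M := by
    rw [pvQis_snoc_self, pvMax_snoc _ _ hqi, ← hmdef]
    rcases hMeq with rfl | rfl
    · exact max_eq_left hMqi
    · exact max_eq_right hMm
  have hlen : (pvVal ts s).length = (1 + m).toNat := by
    rw [pvVal_eq_range]
    simp only [List.length_map, List.length_range]
    rw [← hmdef]
  have hlenI : ((pvVal ts s).length : Int) = 1 + m := by omega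
  have hcl : (pvPad (pvVal ts s) qi).length
      = (pvVal ts s).length + (qi + 1 - (pvVal ts s).length).toNat := by
    rw [pvPad_eq]
    simp
  have hclI : ((pvPad (pvVal ts s) qi).length : Int) = 1 + M := by
    rcases hMeq with rfl | rfl <;> omega
  have hqilt : qi.toNat < (pvPad (pvVal ts s) qi).length := by
    rw [hcl]; omega
  have hcur : ∀ j : Nat, (hj : j < (pvPad (pvVal ts s) qi).length) →
      (pvPad (pvVal ts s) qi)[j] = pvBkt ts s (j : Int) := by
    intro j hj
    rw [List.getElem_of_eq (pvPad_eq _ _) hj]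
    by_cases hjl : j < (pvVal ts s).length
    · rw [List.getElem_append_left hjl]
      rw [List.getElem_of_eq (pvVal_eq_range ts s) hjl]
      simp only [List.getElem_map, List.getElem_range]
    · rw [List.getElem_append_right (Nat.le_of_not_lt hjl), List.getElem_replicate]
      refine (pvBkt_empty ts s (j : Int) ?_).symm
      intro hmem
      have h1 := pvQis_le_max ts s (j : Int) hmem
      rw [← hmdef] at h1
      omega
  rw [pvVal_eq_range, hmax']
  apply List.ext_getElem
  · simp only [List.length_set, List.length_map, List.length_range]
    omega
  · intro i hi1 hi2
    simp only [List.length_map, List.length_range] at hi1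
    simp only [List.length_set] at hi2
    simp only [List.getElem_map, List.getElem_range]
    rw [pvBkt_snoc_self, List.getElem_set]
    by_cases hieq : qi.toNat = i
    · have hiq : ((i : Nat) : Int) = qi := by omega
      rw [hiq, if_pos rfl, if_pos hieq]
      rw [List.getD_eq_getElem _ _ hqilt, hcur qi.toNat hqilt,
        show ((qi.toNat : Nat) : Int) = qi from by omega]
    · rw [if_neg (by omega : ¬ qi = ((i : Nat) : Int)), if_neg hieq, List.append_nil]
      exact (hcur i hi2).symm

theorem pvInvMain (ts : List (Int × String × Int)) (hpos : ∀ t ∈ ts, 0 ≤ t.1) :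
    (ts.foldl pvStepA PySem.Dict.empty).keys = pvLns ts
    ∧ (ts.foldl pvStepA PySem.Dict.empty).keys.Nodup
    ∧ ∀ ln ∈ pvLns ts, (ts.foldl pvStepA PySem.Dict.empty).getD ln [] = pvVal ts ln := by
  induction ts using List.reverseRecOn with
  | nil =>
      refine ⟨rfl, by simp [PySem.Dict.keys_empty], ?_⟩
      intro ln hln
      rw [pvMem_lns] at hln
      simp at hln
  | append_singleton ts t ih =>
      obtain ⟨qi, s, v⟩ := t
      have hqi : 0 ≤ qi := hpos (qi, s, v) (List.mem_append_right _ (by simp))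
      have hpos' : ∀ t ∈ ts, 0 ≤ t.1 := fun t ht => hpos t (List.mem_append_left _ ht)
      obtain ⟨hk, hnd, hval⟩ := ih hpos'
      rw [List.foldl_append, List.foldl_cons, List.foldl_nil]
      set D := ts.foldl pvStepA PySem.Dict.empty with hD
      by_cases hmem : s ∈ pvLns ts
      · have hc : D.contains s = true := by
          rw [PySem.Dict.contains_eq_decide_mem_keys, hk]
          exact decide_eq_true hmem
        have hstep : pvStepA D (qi, s, v)
            = D.insert s ((pvPad (D.getD s []) qi).set qi.toNat
                ((pvPad (D.getD s []) qi).getD qi.toNat [] ++ [v])) := by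
          simp only [pvStepA, hc, if_true]
        rw [hstep]
        have hlns : pvLns (ts ++ [(qi, s, v)]) = pvLns ts := by
          rw [pvLns_snoc, if_pos hmem]
        refine ⟨?_, ?_, ?_⟩
        · rw [PySem.Dict.keys_insert_of_contains _ _ hc, hk, hlns]
        · rw [PySem.Dict.keys_insert_of_contains _ _ hc]
          exact hnd
        · intro ln hln
          rw [hlns] at hln
          rw [PySem.Dict.getD_insert]
          by_cases hss : ln = s
          · subst hss
            rw [if_pos rfl, hval ln hln, pvVal_snoc_self ts hpos' qi v ln hqi]
          · rw [if_neg hss, hval ln hln, pvVal_snoc_ne ts _ ln (fun h => hss (h.symm))]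
      · have hc : D.contains s = false := by
          rw [PySem.Dict.contains_eq_decide_mem_keys, hk]
          exact decide_eq_false hmem
        have hg : (D.insert s []).getD s [] = ([] : List (List Int)) := by
          rw [PySem.Dict.getD_insert, if_pos rfl]
        have hstep : pvStepA D (qi, s, v)
            = D.insert s ((pvPad [] qi).set qi.toNat
                ((pvPad [] qi).getD qi.toNat [] ++ [v])) := by
          simp only [pvStepA, hc, Bool.false_eq_true, if_false, hg,
            PySem.Dict.insert_insert_self]
        rw [hstep]
        have hlns : pvLns (ts ++ [(qi, s, v)]) = pvLns ts ++ [s] := by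
          rw [pvLns_snoc, if_neg hmem]
        refine ⟨?_, ?_, ?_⟩
        · rw [PySem.Dict.keys_insert_of_not_contains _ _ hc, hk, hlns]
        · rw [PySem.Dict.keys_insert_of_not_contains _ _ hc]
          simp only [List.nodup_append, List.nodup_cons, List.nodup_nil, and_true]
          refine ⟨hnd, by simp, ?_⟩
          intro a ha b hb
          simp only [List.mem_singleton] at hb
          subst hb
          rw [hk] at ha
          exact fun h => hmem (h ▸ ha)
        · intro ln hln
          rw [hlns] at hln
          rw [PySem.Dict.getD_insert]
          by_cases hss : ln = s
          · subst hss
            rw [if_pos rfl, ← pvVal_of_not_mem ts ln hmem,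
              pvVal_snoc_self ts hpos' qi v ln hqi, pvVal_of_not_mem ts ln hmem]
          · rw [if_neg hss]
            have hln' : ln ∈ pvLns ts := by
              rcases List.mem_append.1 hln with h | h
              · exact h
              · simp only [List.mem_singleton] at h
                exact absurd h hss
            rw [hval ln hln', pvVal_snoc_ne ts _ ln (fun h => hss (h.symm))]

-- ===== VERDICT (by name: the statement is the Claim_ definition above) =====
theorem reorder_results_spec : Claim_equal_reorder_results := by
  intro old_results _hdom _hpre
  unfold Spec_reorder_results
  rw [pvPortA_eq, pvPortB_eq]
  have hpos : ∀ t ∈ pvTs (pvQueries (pvToDicts old_results)), 0 ≤ t.1 :=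
    pvTsNonneg _ (pvQueriesNonneg _)
  obtain ⟨hk, hnd, hval⟩ := pvInvMain _ hpos
  rw [PySem.Dict.items_eq_map_keys _ hnd [], hk]
  exact List.map_congr_left (fun ln hln => by rw [hval ln hln])
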